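-- pv_equiv track=rewrite | github.com/sotaheavymetal21/review_practice_python | application/template/example.py | next_grade_score
-- ===== SOURCE A (Python) =====
-- def next_grade_score(score):
--     grade_dict = {
--         "S+": 100,
--         "S": 95,
--         "A+": 90,
--         "A": 85,
--         "B+": 80,
--         "B": 75,
--         "C+": 70,
--         "C": 65,
--         "D+": 60,
--         "D": 55,
--         "F": 0,
--     }
--     if score == 100:
--         return "満点です！素晴らしい！"
--     if score < 0 or score > 100 or not isinstance(score, int):
--         return "存在しない点数です。"
--     grade_list = []
--     for grade, point in grade_dict.items():
--         if score > point:
--             return f"現在の評価は{grade}です。上位の評価({grade_list[-1]})まであと{grade_dict[grade_list[-1]] - score}点です。"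
--         else:
--             grade_list.append(grade)
-- ===== SOURCE B (Python) =====
-- def next_grade_score(score):
--     if score == 100:
--         return "満点です！素晴らしい！"
--     if score < 0 or score > 100 or not isinstance(score, int):
--         return "存在しない点数です。"
--     grades = ["F", "D", "D+", "C", "C+", "B", "B+", "A", "A+", "S", "S+"]
--     # thresholds are 0, 55, 60, ..., 100: the next boundary index is a closed form
--     i = max(1, (score - 56) // 5 + 2)
--     threshold = 55 + 5 * (i - 1)
--     return f"現在の評価は{grades[i-1]}です。上位の評価({grades[i]})まであと{threshold - score}点です。"
-- ===== Notes on version B (the rewrite author's own statement) =====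
-- stated objective: simpler
-- what changed: Replaces A's linear scan over the descending grade dict with a grade_list accumulator by a closed-form arithmetic index into a grade table (no loop at all); Pre_ excludes score == 0, where A falls off its loop and returns None instead of a string.
-- outside the precondition, e.g. on next_grade_score(0): A returns None, B returns '現在の評価はFです。上位の評価(D)まであと55点です。'
import Mathlib
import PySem

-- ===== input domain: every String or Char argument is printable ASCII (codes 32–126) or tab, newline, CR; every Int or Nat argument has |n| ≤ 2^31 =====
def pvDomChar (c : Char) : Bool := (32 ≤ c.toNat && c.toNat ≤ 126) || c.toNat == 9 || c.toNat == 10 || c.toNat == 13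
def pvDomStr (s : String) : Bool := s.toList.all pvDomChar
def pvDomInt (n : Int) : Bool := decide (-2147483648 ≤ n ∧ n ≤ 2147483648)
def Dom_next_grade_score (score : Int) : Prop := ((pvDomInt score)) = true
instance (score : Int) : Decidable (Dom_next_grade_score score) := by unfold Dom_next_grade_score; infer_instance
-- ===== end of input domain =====

-- B replaces A's linear scan over the grade dict (with a grade_list accumulator) by a
-- closed-form arithmetic index into a grade table (simpler: no loop at all).


-- ===== PORT A =====
def pvGradeDict : PySem.Dict String Int := PySem.Dict.ofList
  [("S+", 100), ("S", 95), ("A+", 90), ("A", 85), ("B+", 80), ("B", 75),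
   ("C+", 70), ("C", 65), ("D+", 60), ("D", 55), ("F", 0)]

-- A's for-loop over grade_dict.items() with the grade_list accumulator; the fall-off-the-end
-- branch (Python returns None, only at score == 0) is ported as "" and excluded by Pre_.
def pvALoop (score : Int) : List (String × Int) → List String → String
  | [], _ => ""
  | (grade, point) :: rest, gradeList =>
      if score > point then
        -- grade_list[-1] and grade_dict[grade_list[-1]]; both lookups always succeed here,
        -- the .getD defaults are unreachable on Pre_ (score ≠ 0).
        match PySem.List.pyGet? gradeList (-1) with
        | some up =>
            "現在の評価は" ++ grade ++ "です。上位の評価(" ++ up ++ ")まであと" ++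
              PySem.Int.toStr ((PySem.Dict.get? pvGradeDict up).getD 0 - score) ++ "点です。"
        | none => ""
      else
        pvALoop score rest (gradeList ++ [grade])

def next_grade_score (score : Int) : String :=
  if score == 100 then "満点です！素晴らしい！"
  else if score < 0 || score > 100 then "存在しない点数です。"
  else pvALoop score pvGradeDict.items []

-- ===== PORT B =====
def pvGrades : List String := ["F", "D", "D+", "C", "C+", "B", "B+", "A", "A+", "S", "S+"]

def next_grade_score_alt (score : Int) : String :=
  if score == 100 then "満点です！素晴らしい！"
  else if score < 0 || score > 100 then "存在しない点数です。"
  else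
    let i := max 1 (PySem.Int.floordiv (score - 56) 5 + 2)
    let threshold := 55 + 5 * (i - 1)
    "現在の評価は" ++ (PySem.List.pyGet? pvGrades (i - 1)).getD "" ++ "です。上位の評価(" ++
      (PySem.List.pyGet? pvGrades i).getD "" ++ ")まであと" ++
      PySem.Int.toStr (threshold - score) ++ "点です。"

-- ===== PRECONDITION & SPEC =====
-- Pre_ excludes score == 0, where Python A falls off its loop and returns None (no String).
def Pre_next_grade_score (score : Int) : Prop := score ≠ 0
instance (score : Int) : Decidable (Pre_next_grade_score score) := by unfold Pre_next_grade_score; infer_instance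
def pvWitness_next_grade_score : Int := (42)

def Spec_next_grade_score (score : Int) (out : String) : Prop := out = next_grade_score_alt score
instance (score : Int) (out : String) : Decidable (Spec_next_grade_score score out) := by unfold Spec_next_grade_score; infer_instance

-- ===== CLAIM (what is proved, stated in full; the proofs are below) =====
def Claim_equal_next_grade_score : Prop := ∀ (score : Int), Dom_next_grade_score score → Pre_next_grade_score score → Spec_next_grade_score score (next_grade_score score)

-- ===== LEMMAS AND PROOFS =====
theorem pv_in_range (score : Int) (h1 : 1 ≤ score) (h2 : score ≤ 100) :
    next_grade_score score = next_grade_score_alt score := by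
  interval_cases score <;> decide

-- ===== VERDICT (by name: the statement is the Claim_ definition above) =====
theorem next_grade_score_spec : Claim_equal_next_grade_score := by
  intro score _ hpre
  unfold Spec_next_grade_score
  by_cases h1 : 1 ≤ score
  · by_cases h2 : score ≤ 100
    · exact pv_in_range score h1 h2
    · have hgt : score > 100 := by omega
      have hne : ¬ score = 100 := by omega
      simp [next_grade_score, next_grade_score_alt, hgt, hne]
  · have hlt : score < 0 := by unfold Pre_next_grade_score at hpre; omega
    have hne : ¬ score = 100 := by omega
    simp [next_grade_score, next_grade_score_alt, hlt, hne]
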